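-- pv_equiv track=rewrite | github.com/Blaxav/Challenges-algo | AOC2019/Antoine/22-12-2019.py | reversedCutNCards
-- ===== SOURCE A (Python) =====
-- def reversedCutNCards(position: int, length: int, n: int):
--     if n > 0:
--         if position >= length - n:
--             return position + n - length
--         else:
--             return position + n
--     else:
--         return reversedCutNCards(position, length, length+n)
-- ===== SOURCE B (Python) =====
-- def reversedCutNCards(position: int, length: int, n: int):
--     while n <= 0:
--         n += length
--     if position >= length - n:
--         return position + n - length
--     return position + n
-- ===== Notes on version B (the rewrite author's own statement) =====
-- stated objective: simpler
-- what changed: Replaces the recursive normalization of non-positive n (the function re-entering itself with n+length) by an iterative while-loop that adds length until n is positive, then applies the same single-subtraction branch; no recursion or call stack.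
-- outside the precondition, e.g. on reversedCutNCards(0, 1, -920): A returns 0, B returns 0
import Mathlib
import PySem

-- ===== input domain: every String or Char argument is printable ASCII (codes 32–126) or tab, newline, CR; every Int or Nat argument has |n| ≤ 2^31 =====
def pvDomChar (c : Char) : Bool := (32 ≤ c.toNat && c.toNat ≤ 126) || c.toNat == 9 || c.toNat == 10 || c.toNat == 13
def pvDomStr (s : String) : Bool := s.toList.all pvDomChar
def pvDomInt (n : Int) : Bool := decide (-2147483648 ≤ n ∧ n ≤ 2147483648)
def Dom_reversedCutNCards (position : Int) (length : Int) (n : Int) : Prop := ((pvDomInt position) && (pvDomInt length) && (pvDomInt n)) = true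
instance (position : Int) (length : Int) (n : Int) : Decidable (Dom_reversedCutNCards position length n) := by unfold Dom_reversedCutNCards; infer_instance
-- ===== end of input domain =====

-- B replaces A's recursive normalization of non-positive n by an iterative loop; objective: simpler (no recursion / call stack).

-- ===== PORT A =====
-- Literal port of A; the 'else 0' branch is a totality guard only: there (length ≤ 0 ∧ n ≤ 0)
-- the Python recurses forever (RecursionError), which Pre_ excludes.
def reversedCutNCards (position : Int) (length : Int) (n : Int) : Int :=
  if n > 0 then
    if position ≥ length - n then position + n - length
    else position + n
  else
    if 0 < length then reversedCutNCards position length (length + n)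
    else 0
termination_by (1 - n).toNat
decreasing_by omega

-- ===== PORT B =====
-- the 'while n <= 0: n += length' loop of Source B; 'else n' is a totality guard for length ≤ 0
-- (there the Python loop never terminates; excluded by Pre_).
def cutNormLoop (length : Int) (n : Int) : Int :=
  if n ≤ 0 then
    if 0 < length then cutNormLoop length (n + length)
    else n
  else n
termination_by (1 - n).toNat
decreasing_by omega

def reversedCutNCards_alt (position : Int) (length : Int) (n : Int) : Int :=
  let m := cutNormLoop length n
  if position ≥ length - m then position + m - length
  else position + m

-- ===== PRECONDITION & SPEC =====
-- Pre_ excludes inputs where A raises: for length ≤ 0 ∧ n ≤ 0 the recursion never terminates, and for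
-- very negative n (recursion depth > Python's recursion limit) A raises RecursionError; the depth bound
-- 900 is conservative, so a narrow band of moderately deep inputs on which A still returns is also excluded.
def Pre_reversedCutNCards (position : Int) (length : Int) (n : Int) : Prop :=
  0 < n ∨ (0 < length ∧ 0 < n + 900 * length)
instance (position : Int) (length : Int) (n : Int) : Decidable (Pre_reversedCutNCards position length n) := by unfold Pre_reversedCutNCards; infer_instance
def pvWitness_reversedCutNCards : Int × Int × Int := (3, 10, 4)

def Spec_reversedCutNCards (position : Int) (length : Int) (n : Int) (out : Int) : Prop := out = reversedCutNCards_alt position length n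
instance (position : Int) (length : Int) (n : Int) (out : Int) : Decidable (Spec_reversedCutNCards position length n out) := by unfold Spec_reversedCutNCards; infer_instance

-- ===== CLAIM (what is proved, stated in full; the proofs are below) =====
def Claim_equal_reversedCutNCards : Prop := ∀ (position : Int) (length : Int) (n : Int), Dom_reversedCutNCards position length n → Pre_reversedCutNCards position length n → Spec_reversedCutNCards position length n (reversedCutNCards position length n)

-- ===== LEMMAS AND PROOFS =====
theorem reversedCutNCards_eq_alt (position length n : Int) (h : 0 < n ∨ 0 < length) :
    reversedCutNCards position length n = reversedCutNCards_alt position length n := by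
  by_cases hn : 0 < n
  · rw [reversedCutNCards, reversedCutNCards_alt, cutNormLoop]
    simp [hn, show ¬ n ≤ 0 by omega]
  · have hl : 0 < length := h.resolve_left hn
    have hnorm : cutNormLoop length n = cutNormLoop length (length + n) := by
      conv_lhs => rw [cutNormLoop]
      simp only [if_pos (show n ≤ 0 by omega), if_pos hl, Int.add_comm n length]
    have halt : reversedCutNCards_alt position length n
        = reversedCutNCards_alt position length (length + n) := by
      simp only [reversedCutNCards_alt, hnorm]
    rw [reversedCutNCards]
    simp only [if_neg hn, if_pos hl]
    rw [reversedCutNCards_eq_alt position length (length + n) (Or.inr hl), halt]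
termination_by (1 - n).toNat
decreasing_by omega

-- ===== VERDICT (by name: the statement is the Claim_ definition above) =====
theorem reversedCutNCards_spec : Claim_equal_reversedCutNCards := by
  intro position length n _ hpre
  have : 0 < n ∨ 0 < length := by
    rcases hpre with h | ⟨h, _⟩
    · exact Or.inl h
    · exact Or.inr h
  exact reversedCutNCards_eq_alt position length n this
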